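-- pv_equiv track=rewrite | github.com/ilia-glushchenko/bloc-summer-analytics-2025 | tabs/gym_stats_tab.py | prepare_characteristic_data
-- ===== SOURCE A (Python) =====
-- from typing import Dict, List, Optional, Tuple, Any
--
-- def prepare_characteristic_data(
--     data_dict: Dict[str, Dict[str, int]],
--     sort_by_count: bool = False
-- ) -> Tuple[List[str], List[int], List[int]]:
--     """
--     Prepares data from a characteristic dictionary for visualization.
--
--     Args:
--         data_dict: Dictionary mapping characteristic values to count data
--         sort_by_count: Whether to sort the data by count (highest to lowest)
--
--     Returns:
--         Tuple of (names, total_counts, completed_counts)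
--     """
--     names = list(data_dict.keys())
--     total_counts = [data_dict[name]["total"] for name in names]
--     completed_counts = [data_dict[name]["completed"] for name in names]
--
--     # Sort by count if requested
--     if sort_by_count and names:
--         sorted_indices = sorted(range(len(total_counts)), key=lambda i: total_counts[i], reverse=True)
--         names = [names[i] for i in sorted_indices]
--         total_counts = [total_counts[i] for i in sorted_indices]
--         completed_counts = [completed_counts[i] for i in sorted_indices]
--
--     return names, total_counts, completed_counts
-- ===== SOURCE B (Python) =====
-- def prepare_characteristic_data(data_dict, sort_by_count=False):
--     if sort_by_count and data_dict:
--         # Bucket the entries by their total; no comparison sort of the records themselves.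
--         buckets = {}
--         for name, d in data_dict.items():
--             buckets.setdefault(d["total"], []).append((name, d["completed"]))
--         ordered = [(name, t, c) for t in sorted(buckets, reverse=True) for name, c in buckets[t]]
--     else:
--         ordered = [(name, d["total"], d["completed"]) for name, d in data_dict.items()]
--     names = [r[0] for r in ordered]
--     total_counts = [r[1] for r in ordered]
--     completed_counts = [r[2] for r in ordered]
--     return names, total_counts, completed_counts
-- ===== Notes on version B (the rewrite author's own statement) =====
-- stated objective: alternative
-- what changed: B never comparison-sorts the records: it groups entries into a dict of buckets keyed by total, sorts only the distinct totals descending, and emits the buckets in that key order (ties keep insertion order by construction), instead of A's stable sort of an index permutation over three parallel lists.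
import Mathlib
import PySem

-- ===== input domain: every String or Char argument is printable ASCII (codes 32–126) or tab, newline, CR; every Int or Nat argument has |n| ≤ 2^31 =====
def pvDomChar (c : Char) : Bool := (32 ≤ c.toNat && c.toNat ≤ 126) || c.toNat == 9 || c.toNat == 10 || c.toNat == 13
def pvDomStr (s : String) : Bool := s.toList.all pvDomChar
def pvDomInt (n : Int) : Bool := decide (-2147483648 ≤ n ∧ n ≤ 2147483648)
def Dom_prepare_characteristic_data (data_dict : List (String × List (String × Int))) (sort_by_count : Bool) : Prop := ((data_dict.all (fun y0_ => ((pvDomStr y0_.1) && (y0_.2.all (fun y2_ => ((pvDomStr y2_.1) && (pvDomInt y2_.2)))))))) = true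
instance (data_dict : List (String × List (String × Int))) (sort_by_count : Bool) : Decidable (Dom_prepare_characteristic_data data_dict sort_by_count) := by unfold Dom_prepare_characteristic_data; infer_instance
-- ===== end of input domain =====

-- B replaces A's stable sort of an index permutation by grouping the entries into buckets keyed
-- by total and emitting the buckets in descending key order (objective: alternative).
-- Return values only; neither version mutates its input.

-- ===== PORT A =====
-- A's data_dict is a Python dict of dicts; the assoc-list argument is decoded with Dict.ofList
-- (duplicate keys overwrite in place, exactly as a Python dict built from these pairs).
-- Under Pre_ the inner lookups d[name]["total"] / ["completed"] always hit, so getD is exact.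
def prepare_characteristic_data (data_dict : List (String × List (String × Int))) (sort_by_count : Bool) : List String × List Int × List Int :=
  let d : PySem.Dict String (PySem.Dict String Int) :=
    PySem.Dict.ofList (data_dict.map (fun p => (p.1, PySem.Dict.ofList p.2)))
  let names := d.keys
  let total_counts := names.map (fun name => (d.getD name PySem.Dict.empty).getD "total" 0)
  let completed_counts := names.map (fun name => (d.getD name PySem.Dict.empty).getD "completed" 0)
  if sort_by_count && !names.isEmpty then
    let sorted_indices := PySem.List.sorted (PySem.List.pyRange 0 (PySem.List.len total_counts))
      (fun i => PySem.List.pyGetD total_counts i 0) true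
    (sorted_indices.map (fun i => PySem.List.pyGetD names i ""),
     sorted_indices.map (fun i => PySem.List.pyGetD total_counts i 0),
     sorted_indices.map (fun i => PySem.List.pyGetD completed_counts i 0))
  else
    (names, total_counts, completed_counts)

-- ===== PORT B =====
-- Same dict decoding. buckets.setdefault(t, []).append(v) is Dict.modify t [] (· ++ [v]);
-- buckets[t] is looked up with getD [], exact because every t comes from buckets' own keys.
def prepare_characteristic_data_alt (data_dict : List (String × List (String × Int))) (sort_by_count : Bool) : List String × List Int × List Int :=
  let d : PySem.Dict String (PySem.Dict String Int) :=
    PySem.Dict.ofList (data_dict.map (fun p => (p.1, PySem.Dict.ofList p.2)))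
  let ordered :=
    if sort_by_count && !d.items.isEmpty then
      let buckets : PySem.Dict Int (List (String × Int)) :=
        d.items.foldl (fun b p =>
          b.modify (p.2.getD "total" 0) [] (fun l => l ++ [(p.1, p.2.getD "completed" 0)]))
          PySem.Dict.empty
      (PySem.List.sorted buckets.keys (fun t => t) true).flatMap
        (fun t => (buckets.getD t []).map (fun q => (q.1, t, q.2)))
    else
      d.items.map (fun p => (p.1, p.2.getD "total" 0, p.2.getD "completed" 0))
  (ordered.map (fun r => r.1), ordered.map (fun r => r.2.1), ordered.map (fun r => r.2.2))

-- ===== PRECONDITION & SPEC =====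
-- Pre_ excludes exactly the inputs where an effective inner dict (last value for its outer key)
-- lacks the key "total" or "completed": there the Python A (and B) raises KeyError.
def Pre_prepare_characteristic_data (data_dict : List (String × List (String × Int))) (sort_by_count : Bool) : Prop :=
  ∀ inner ∈ (PySem.Dict.ofList data_dict).values,
    "total" ∈ inner.map Prod.fst ∧ "completed" ∈ inner.map Prod.fst
instance (data_dict : List (String × List (String × Int))) (sort_by_count : Bool) : Decidable (Pre_prepare_characteristic_data data_dict sort_by_count) := by unfold Pre_prepare_characteristic_data; infer_instance
def pvWitness_prepare_characteristic_data : (List (String × List (String × Int))) × Bool :=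
  ([("a", [("total", 2), ("completed", 1)]), ("b", [("total", 5), ("completed", 0)])], true)

def Spec_prepare_characteristic_data (data_dict : List (String × List (String × Int))) (sort_by_count : Bool) (out : List String × List Int × List Int) : Prop := out = prepare_characteristic_data_alt data_dict sort_by_count
instance (data_dict : List (String × List (String × Int))) (sort_by_count : Bool) (out : List String × List Int × List Int) : Decidable (Spec_prepare_characteristic_data data_dict sort_by_count out) := by unfold Spec_prepare_characteristic_data; infer_instance

-- ===== CLAIM (what is proved, stated in full; the proofs are below) =====
def Claim_equal_prepare_characteristic_data : Prop := ∀ (data_dict : List (String × List (String × Int))) (sort_by_count : Bool), Dom_prepare_characteristic_data data_dict sort_by_count → Pre_prepare_characteristic_data data_dict sort_by_count → Spec_prepare_characteristic_data data_dict sort_by_count (prepare_characteristic_data data_dict sort_by_count)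

-- ===== LEMMAS AND PROOFS =====

theorem insertBy_map_comm {α β κ : Type} [LT κ] [DecidableLT κ] (g : α → β) (key : β → κ)
    (x : α) (ys : List α) :
    PySem.List.insertBy (fun a b => decide (key b < key a)) (g x) (ys.map g)
      = (PySem.List.insertBy (fun a b => decide (key (g b) < key (g a))) x ys).map g := by
  induction ys with
  | nil => rfl
  | cons y ys ih =>
      by_cases h : key (g y) < key (g x) <;>
        simp [PySem.List.insertBy, h, ih]

theorem sorted_rev_map {α β κ : Type} [LinearOrder κ] (l : List α) (g : α → β) (key : β → κ) :
    PySem.List.sorted (l.map g) key true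
      = (PySem.List.sorted l (fun a => key (g a)) true).map g := by
  rw [PySem.List.sorted_rev_eq_foldl_insertBy, PySem.List.sorted_rev_eq_foldl_insertBy,
    List.foldl_map]
  have main : ∀ (l : List α) (acc : List α),
      List.foldl (fun acc x => PySem.List.insertBy (fun a b => decide (key b < key a)) (g x) acc)
        (acc.map g) l
      = (List.foldl (fun acc x => PySem.List.insertBy
          (fun a b => decide (key (g b) < key (g a))) x acc) acc l).map g := by
    intro l
    induction l with
    | nil => intro acc; rfl
    | cons x xs ih =>
        intro acc
        simp only [List.foldl_cons]
        rw [insertBy_map_comm g key x acc, ih]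
  exact main l []

-- A as the projection of the stable reverse sort of the record list built from the keys
theorem core (ks : List String) (ft fc : String → Int) (b : Bool) :
    (if b && !ks.isEmpty then
       (PySem.List.sorted (PySem.List.pyRange 0 (PySem.List.len (ks.map ft)))
          (fun i => PySem.List.pyGetD (ks.map ft) i 0) true |> fun idxs =>
       (idxs.map (fun i => PySem.List.pyGetD ks i ""),
        idxs.map (fun i => PySem.List.pyGetD (ks.map ft) i 0),
        idxs.map (fun i => PySem.List.pyGetD (ks.map fc) i 0)))
     else (ks, ks.map ft, ks.map fc))
    = ((if b && !(ks.map (fun k => (k, ft k, fc k))).isEmpty then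
          PySem.List.sorted (ks.map (fun k => (k, ft k, fc k))) (fun r => r.2.1) true
        else ks.map (fun k => (k, ft k, fc k))) |> fun recs =>
       (recs.map (fun r => r.1), recs.map (fun r => r.2.1), recs.map (fun r => r.2.2))) := by
  set G : String → String × Int × Int := fun k => (k, ft k, fc k) with hG
  by_cases hb : (b && !ks.isEmpty) = true
  · simp only [List.isEmpty_map, hb, if_pos]
    set recs := ks.map G with hrecs
    set dflt : String × Int × Int := ("", 0, 0) with hdflt
    have hr : (PySem.List.pyRange 0 (PySem.List.len recs)).map
        (fun i => PySem.List.pyGetD recs i dflt) = recs :=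
      PySem.List.map_pyGetD_pyRange_zero recs dflt
    have hlen : PySem.List.len (ks.map ft) = PySem.List.len recs := by
      simp [PySem.List.len, hrecs]
    have hft : ks.map ft = recs.map (fun r => r.2.1) := by
      simp [hrecs, hG, List.map_map, Function.comp]
    have hfc : ks.map fc = recs.map (fun r => r.2.2) := by
      simp [hrecs, hG, List.map_map, Function.comp]
    have hks : ks = recs.map (fun r => r.1) := by
      simp [hrecs, hG, List.map_map, Function.comp_def]
    have hkey : (fun i => PySem.List.pyGetD (ks.map ft) i 0)
        = (fun i => (PySem.List.pyGetD recs i dflt).2.1) := by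
      funext i
      rw [hft]
      exact PySem.List.pyGetD_map (fun r => r.2.1) recs i dflt
    have hsorted : PySem.List.sorted recs (fun r => r.2.1) true
        = (PySem.List.sorted (PySem.List.pyRange 0 (PySem.List.len recs))
            (fun i => (PySem.List.pyGetD recs i dflt).2.1) true).map
            (fun i => PySem.List.pyGetD recs i dflt) := by
      conv_lhs => rw [← hr]
      exact sorted_rev_map _ _ _
    rw [hlen, hkey, hsorted]
    refine Prod.ext ?_ (Prod.ext ?_ ?_) <;> simp only [List.map_map] <;>
      refine List.map_congr_left ?_ <;> intro i _ <;>
      simp only [Function.comp]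
    · rw [hks]; exact PySem.List.pyGetD_map (fun r => r.1) recs i dflt
    · rw [hfc]; exact PySem.List.pyGetD_map (fun r => r.2.2) recs i dflt
  · simp only [List.isEmpty_map, hb, if_neg, Bool.not_eq_true]
    simp [hG, List.map_map, Function.comp_def]

-- insertBy walks past a block of elements it does not go before
theorem insertBy_append_left {α : Type} (before : α → α → Bool) (x : α) (as bs : List α)
    (h : ∀ y ∈ as, before x y = false) :
    PySem.List.insertBy before x (as ++ bs) = as ++ PySem.List.insertBy before x bs := by
  induction as with
  | nil => rfl
  | cons a as ih =>
      have ha : before x a = false := h a (by simp)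
      simp [PySem.List.insertBy, ha, ih (fun y hy => h y (by simp [hy]))]

-- insertBy lands in front of a list all of whose elements it goes before
theorem insertBy_eq_cons {α : Type} (before : α → α → Bool) (x : α) (l : List α)
    (h : ∀ y ∈ l, before x y = true) :
    PySem.List.insertBy before x l = x :: l := by
  cases l with
  | nil => rfl
  | cons a as => simp [PySem.List.insertBy, h a (by simp)]

-- grouping: appending x to its existing bucket = inserting x into the grouped concatenation
theorem grouped_mem {α : Type} (key : α → Int) (x : α) :
    ∀ (K : List Int) (F : Int → List α),
      K.Pairwise (fun a b => b < a) →
      (∀ t, ∀ r ∈ F t, key r = t) →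
      key x ∈ K →
      K.flatMap (fun t => F t ++ if key x = t then [x] else [])
        = PySem.List.insertBy (fun a b => decide (key b < key a)) x (K.flatMap F) := by
  intro K
  induction K with
  | nil => intro F _ _ hx; cases hx
  | cons t K' ih =>
      intro F hp hF hx
      have hlt : ∀ b ∈ K', b < t := (List.pairwise_cons.mp hp).1
      simp only [List.flatMap_cons]
      by_cases hxt : key x = t
      · have hrest : K'.flatMap (fun t' => F t' ++ if key x = t' then [x] else [])
            = K'.flatMap F := by
          rw [List.flatMap_def, List.flatMap_def]
          congr 1
          refine List.map_congr_left (fun t' ht' => ?_)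
          have : key x ≠ t' := by have := hlt t' ht'; omega
          simp [this]
        rw [hrest, if_pos hxt]
        rw [insertBy_append_left _ _ (F t) _ (fun y hy => by
          have := hF t y hy; simp [this, hxt])]
        rw [insertBy_eq_cons _ _ _ (fun y hy => by
          simp only [List.mem_flatMap] at hy
          obtain ⟨t', ht', hy'⟩ := hy
          have h1 := hF t' y hy'
          have h2 := hlt t' ht'
          simp [h1, hxt]; omega)]
        simp
      · have hx' : key x ∈ K' := by
          rcases List.mem_cons.mp hx with h | h
          · exact absurd h hxt
          · exact h
        have hxlt : key x < t := hlt _ hx'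
        rw [if_neg hxt]
        rw [insertBy_append_left _ _ (F t) _ (fun y hy => by
          have := hF t y hy; simp [this]; omega)]
        rw [ih F (List.pairwise_cons.mp hp).2 hF hx']
        simp
-- grouping: a fresh key = inserting the key into the key list and x into the concatenation
theorem grouped_fresh {α : Type} (key : α → Int) (x : α) :
    ∀ (K : List Int) (F : Int → List α),
      K.Pairwise (fun a b => b < a) →
      (∀ t, ∀ r ∈ F t, key r = t) →
      key x ∉ K →
      F (key x) = [] →
      (PySem.List.insertBy (fun a b : Int => decide (b < a)) (key x) K).flatMap
          (fun t => F t ++ if key x = t then [x] else [])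
        = PySem.List.insertBy (fun a b => decide (key b < key a)) x (K.flatMap F) := by
  intro K
  induction K with
  | nil =>
      intro F _ _ _ hFx
      simp [PySem.List.insertBy, hFx]
  | cons t K' ih =>
      intro F hp hF hx hFx
      have hlt : ∀ b ∈ K', b < t := (List.pairwise_cons.mp hp).1
      have hxt : key x ≠ t := fun h => hx (by simp [h])
      have hx' : key x ∉ K' := fun h => hx (by simp [h])
      by_cases hc : t < key x
      · have : PySem.List.insertBy (fun a b : Int => decide (b < a)) (key x) (t :: K')
            = key x :: t :: K' := by simp [PySem.List.insertBy, hc]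
        rw [this]
        simp only [List.flatMap_cons, hFx]
        have hrest : K'.flatMap (fun t' => F t' ++ if key x = t' then [x] else [])
            = K'.flatMap F := by
          rw [List.flatMap_def, List.flatMap_def]
          congr 1
          refine List.map_congr_left (fun t' ht' => ?_)
          have : key x ≠ t' := by have := hlt t' ht'; omega
          simp [this]
        rw [hrest, if_neg hxt]
        rw [insertBy_eq_cons _ _ _ (fun y hy => by
          simp only [List.mem_append, List.mem_flatMap] at hy
          rcases hy with hy | ⟨t', ht', hy'⟩
          · have := hF t y hy; simp [this]; omega
          · have h1 := hF t' y hy'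
            have h2 := hlt t' ht'
            simp [h1]; omega)]
        simp
      · have hxlt : key x < t := by omega
        have : PySem.List.insertBy (fun a b : Int => decide (b < a)) (key x) (t :: K')
            = t :: PySem.List.insertBy (fun a b : Int => decide (b < a)) (key x) K' := by
          simp [PySem.List.insertBy, hc]
        rw [this]
        simp only [List.flatMap_cons, if_neg hxt]
        rw [ih F (List.pairwise_cons.mp hp).2 hF hx' hFx]
        rw [insertBy_append_left _ _ (F t) _ (fun y hy => by
          have := hF t y hy; simp [this]; omega)]
        simp

-- the stable reverse sort IS the concatenation of the buckets over the descending distinct keys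
theorem sorted_rev_eq_grouped {α : Type} (key : α → Int) (rs : List α) :
    (PySem.List.sorted (PySem.List.dedup (rs.map key)) (fun t => t) true).flatMap
        (fun t => rs.filter (fun r => decide (key r = t)))
      = PySem.List.sorted rs key true := by
  induction rs using List.reverseRecOn with
  | nil => simp [PySem.List.sorted, PySem.List.dedup]
  | append_singleton rs x ih =>
      have hpair : (PySem.List.sorted (PySem.List.dedup (rs.map key)) (fun t => t) true).Pairwise
          (fun a b => b < a) := by
        have h1 := PySem.List.sorted_pairwise_rev (PySem.List.dedup (rs.map key)) (fun t : Int => t)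
        have h2 : (PySem.List.sorted (PySem.List.dedup (rs.map key)) (fun t : Int => t) true).Nodup := by
          refine (PySem.List.sorted_perm _ _ _).nodup_iff.mpr ?_
          rw [PySem.List.dedup_eq_ofList]
          exact PySem.Set.nodup_ofList _
        exact (h1.and h2).imp (fun h => by
          rcases h with ⟨hle, hne⟩
          exact lt_of_le_of_ne hle (fun e => hne e.symm))
      have hF : ∀ t : Int, ∀ r ∈ rs.filter (fun r => decide (key r = t)), key r = t := by
        intro t r hr
        simpa using (List.mem_filter.mp hr).2
      have hfilter : ∀ t : Int, (rs ++ [x]).filter (fun r => decide (key r = t))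
          = rs.filter (fun r => decide (key r = t)) ++ if key x = t then [x] else [] := by
        intro t
        rw [List.filter_append]
        congr 1
        by_cases h : key x = t <;> simp [h]
      rw [List.map_append, PySem.List.dedup_eq_ofList, PySem.Set.ofList_eq_foldl,
        List.foldl_append]
      simp only [List.map_cons, List.map_nil, List.foldl_cons, List.foldl_nil]
      rw [← PySem.Set.ofList_eq_foldl, ← PySem.List.dedup_eq_ofList]
      rw [PySem.List.sorted_rev_eq_foldl_insertBy (rs ++ [x]) key, List.foldl_append]
      simp only [List.foldl_cons, List.foldl_nil]
      rw [← PySem.List.sorted_rev_eq_foldl_insertBy rs key]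
      by_cases hmem : key x ∈ PySem.List.dedup (rs.map key)
      · have hadd : PySem.Set.add (PySem.List.dedup (rs.map key)) (key x)
            = PySem.List.dedup (rs.map key) := by
          rw [PySem.List.dedup_eq_ofList] at hmem ⊢
          simp [PySem.Set.add, PySem.Set.contains, hmem]
        rw [hadd]
        rw [← ih]
        have := grouped_mem key x (PySem.List.sorted (PySem.List.dedup (rs.map key)) (fun t => t) true)
          (fun t => rs.filter (fun r => decide (key r = t))) hpair hF
          (by rw [PySem.List.mem_sorted]; exact hmem)
        rw [← this, List.flatMap_def, List.flatMap_def]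
        congr 1
        exact List.map_congr_left (fun t _ => hfilter t)
      · have hadd : PySem.Set.add (PySem.List.dedup (rs.map key)) (key x)
            = PySem.List.dedup (rs.map key) ++ [key x] := by
          rw [PySem.List.dedup_eq_ofList] at hmem ⊢
          simp [PySem.Set.add, PySem.Set.contains, hmem]
        rw [hadd]
        have hnil : rs.filter (fun r => decide (key r = key x)) = [] := by
          rw [List.filter_eq_nil_iff]
          intro r hr
          simp only [decide_eq_true_eq]
          intro h
          apply hmem
          rw [PySem.List.dedup_eq_ofList, PySem.Set.mem_ofList]
          exact List.mem_map.mpr ⟨r, hr, h⟩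
        rw [PySem.List.sorted_rev_eq_foldl_insertBy
          (PySem.List.dedup (rs.map key) ++ [key x]) (fun t => t), List.foldl_append]
        simp only [List.foldl_cons, List.foldl_nil]
        rw [← PySem.List.sorted_rev_eq_foldl_insertBy (PySem.List.dedup (rs.map key)) (fun t => t)]
        rw [← ih]
        have := grouped_fresh key x
          (PySem.List.sorted (PySem.List.dedup (rs.map key)) (fun t => t) true)
          (fun t => rs.filter (fun r => decide (key r = t))) hpair hF
          (by rw [PySem.List.mem_sorted]; exact hmem) hnil
        rw [← this, List.flatMap_def, List.flatMap_def]
        congr 1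
        exact List.map_congr_left (fun t _ => hfilter t)

-- the record form of A (core's right-hand side) equals B's bucket form
theorem core2 (ks : List String) (ft fc : String → Int) (b : Bool) :
    (if b && !ks.isEmpty then
       (PySem.List.sorted (PySem.List.pyRange 0 (PySem.List.len (ks.map ft)))
          (fun i => PySem.List.pyGetD (ks.map ft) i 0) true |> fun idxs =>
       (idxs.map (fun i => PySem.List.pyGetD ks i ""),
        idxs.map (fun i => PySem.List.pyGetD (ks.map ft) i 0),
        idxs.map (fun i => PySem.List.pyGetD (ks.map fc) i 0)))
     else (ks, ks.map ft, ks.map fc))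
    = ((if b && !ks.isEmpty then
          (PySem.List.sorted
              (ks.foldl (fun bk k => bk.modify (ft k) [] (fun l => l ++ [(k, fc k)]))
                PySem.Dict.empty).keys (fun t => t) true).flatMap
            (fun t => ((ks.foldl (fun bk k => bk.modify (ft k) [] (fun l => l ++ [(k, fc k)]))
                PySem.Dict.empty).getD t []).map (fun q => (q.1, t, q.2)))
        else ks.map (fun k => (k, ft k, fc k))) |> fun ordered =>
       (ordered.map (fun r => r.1), ordered.map (fun r => r.2.1), ordered.map (fun r => r.2.2))) := by
  rw [core ks ft fc b]
  set G : String → String × Int × Int := fun k => (k, ft k, fc k) with hG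
  set recs := ks.map G with hrecs
  have hempty : recs.isEmpty = ks.isEmpty := by simp [hrecs]
  by_cases hb : (b && !ks.isEmpty) = true
  · simp only [hempty, hb, if_pos]
    have hfold : ks.foldl (fun bk k => bk.modify (ft k) [] (fun l => l ++ [(k, fc k)]))
          PySem.Dict.empty
        = (recs.map (fun r => (r.2.1, (r.1, r.2.2)))).foldl
            (fun d p => d.modify p.1 [] (fun l => l ++ [p.2])) PySem.Dict.empty := by
      rw [hrecs, List.map_map, List.foldl_map]
      rfl
    have hget : ∀ t : Int,
        (ks.foldl (fun bk k => bk.modify (ft k) [] (fun l => l ++ [(k, fc k)]))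
          PySem.Dict.empty).getD t []
        = (recs.filter (fun r => decide (r.2.1 = t))).map (fun r => (r.1, r.2.2)) := by
      intro t
      rw [hfold, PySem.Dict.getD_foldl_modify_append]
      simp only [PySem.Dict.getD_empty, List.nil_append, List.filter_map, List.map_map]
      have hpred : ((fun p : Int × String × Int => p.1 == t) ∘
            (fun r : String × Int × Int => (r.2.1, (r.1, r.2.2))))
          = (fun r : String × Int × Int => decide (r.2.1 = t)) := by
        funext r
        by_cases h : r.2.1 = t <;> simp [Function.comp, h]
      have hmap : ((fun x : Int × String × Int => x.2) ∘
            (fun r : String × Int × Int => (r.2.1, (r.1, r.2.2))))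
          = (fun r : String × Int × Int => (r.1, r.2.2)) := rfl
      rw [hpred, hmap]
    have hkeys : (ks.foldl (fun bk k => bk.modify (ft k) [] (fun l => l ++ [(k, fc k)]))
          PySem.Dict.empty).keys
        = PySem.List.dedup (recs.map (fun r => r.2.1)) := by
      rw [hfold]
      have hk := PySem.Dict.keys_foldl_modify_key
        (l := recs.map (fun r => (r.2.1, (r.1, r.2.2)))) (key := fun p => p.1)
        (d0 := ([] : List (String × Int))) (f := fun _ p l => l ++ [p.2])
        (d := PySem.Dict.empty)
      simp only [] at hk
      rw [hk, List.map_map]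
      have hc : ((fun p : Int × String × Int => p.1) ∘
            (fun r : String × Int × Int => (r.2.1, (r.1, r.2.2))))
          = fun r : String × Int × Int => r.2.1 := rfl
      rw [hc, PySem.List.dedup_eq_ofList, PySem.Set.ofList_eq_foldl]
      rfl
    have hordered :
        (PySem.List.sorted
            (ks.foldl (fun bk k => bk.modify (ft k) [] (fun l => l ++ [(k, fc k)]))
              PySem.Dict.empty).keys (fun t => t) true).flatMap
          (fun t => ((ks.foldl (fun bk k => bk.modify (ft k) [] (fun l => l ++ [(k, fc k)]))
              PySem.Dict.empty).getD t []).map (fun q => (q.1, t, q.2)))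
        = PySem.List.sorted recs (fun r => r.2.1) true := by
      rw [hkeys, ← sorted_rev_eq_grouped (fun r => r.2.1) recs]
      rw [List.flatMap_def, List.flatMap_def]
      congr 1
      refine List.map_congr_left (fun t _ => ?_)
      rw [hget t, List.map_map]
      have hid : ∀ r ∈ recs.filter (fun r => decide (r.2.1 = t)),
          ((fun q : String × Int => (q.1, t, q.2)) ∘
            (fun r : String × Int × Int => (r.1, r.2.2))) r = id r := by
        intro r hr
        have h2 : r.2.1 = t := by simpa using (List.mem_filter.mp hr).2
        simp [Function.comp, ← h2]
      rw [List.map_congr_left hid, List.map_id]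
    rw [hordered]
  · simp only [hempty, hb, if_neg, Bool.not_eq_true]

theorem ab_eq (data_dict : List (String × List (String × Int))) (sort_by_count : Bool) :
    prepare_characteristic_data data_dict sort_by_count
      = prepare_characteristic_data_alt data_dict sort_by_count := by
  simp only [prepare_characteristic_data, prepare_characteristic_data_alt]
  rw [PySem.Dict.items_eq_map_keys _ (PySem.Dict.nodup_keys_ofList _) PySem.Dict.empty,
    List.map_map, List.foldl_map, List.isEmpty_map]
  exact core2 _ _ _ sort_by_count

-- ===== VERDICT (by name: the statement is the Claim_ definition above) =====
theorem prepare_characteristic_data_spec : Claim_equal_prepare_characteristic_data := by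
  intro dd b _ _
  unfold Spec_prepare_characteristic_data
  exact ab_eq dd b
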